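-- pv_equiv track=rewrite | github.com/vladkostikov/HSP | entrance/big_minus.py | determine_the_larger_number
-- ===== SOURCE A (Python) =====
-- def determine_the_larger_number(first_num: list, second_num: list) -> list:
--     if len(first_num) > len(second_num):
--         return first_num
--
--     if len(first_num) < len(second_num):
--         return second_num
--
--     for i, v in enumerate(first_num):
--         if first_num[i] == second_num[i]:
--             continue
--
--         if first_num[i] > second_num[i]:
--             return first_num
--
--         if first_num[i] < second_num[i]:
--             return second_num
--
--     return first_num
-- ===== SOURCE B (Python) =====
-- def determine_the_larger_number(first_num: list, second_num: list) -> list: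
--     if len(first_num) != len(second_num):
--         return first_num if len(first_num) > len(second_num) else second_num
--     cmp = 0
--     for a, b in zip(reversed(first_num), reversed(second_num)):
--         if a > b:
--             cmp = 1
--         elif a < b:
--             cmp = -1
--     return second_num if cmp == -1 else first_num
-- ===== Notes on version B (the rewrite author's own statement) =====
-- stated objective: alternative
-- what changed: Instead of a left-to-right scan with early returns at the first differing digit, B scans the digit pairs from least-significant to most-significant with an overwrite accumulator (no early exit): each difference overwrites the comparison sign, so the most-significant difference is the last write and wins; the length guard is a single inequality test.
import Mathlib
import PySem

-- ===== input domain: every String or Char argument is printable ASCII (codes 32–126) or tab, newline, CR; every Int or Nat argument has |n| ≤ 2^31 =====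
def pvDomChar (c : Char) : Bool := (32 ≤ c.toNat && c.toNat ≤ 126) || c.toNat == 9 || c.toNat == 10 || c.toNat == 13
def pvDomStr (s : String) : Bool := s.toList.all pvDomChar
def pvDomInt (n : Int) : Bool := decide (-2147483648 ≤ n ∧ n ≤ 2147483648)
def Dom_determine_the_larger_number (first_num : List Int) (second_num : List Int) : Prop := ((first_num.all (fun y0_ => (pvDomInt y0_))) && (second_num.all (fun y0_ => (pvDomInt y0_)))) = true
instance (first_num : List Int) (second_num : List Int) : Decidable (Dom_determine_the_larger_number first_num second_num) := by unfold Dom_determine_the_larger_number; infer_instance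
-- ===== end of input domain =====

-- B replaces A's left-to-right early-exit digit scan with a full right-to-left
-- (least-significant-first) pass over zipped reversed digits using an overwrite
-- accumulator, plus a single length-inequality guard; objective: alternative.


-- ===== PORT A =====
-- the 'for i, v in enumerate(first_num)' loop; first_num[i]/second_num[i] via pyGet?
-- (none = IndexError, unreachable here since the loop only runs with equal lengths)
def dtlnLoop (first_num second_num : List Int) : List (Int × Int) → List Int
  | [] => first_num
  | (i, _v) :: rest =>
    match PySem.List.pyGet? first_num i, PySem.List.pyGet? second_num i with
    | some a, some b =>
      if a = b then dtlnLoop first_num second_num rest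
      else if a > b then first_num
      else if a < b then second_num
      else dtlnLoop first_num second_num rest
    | _, _ => first_num

def determine_the_larger_number (first_num : List Int) (second_num : List Int) : List Int :=
  if first_num.length > second_num.length then first_num
  else if first_num.length < second_num.length then second_num
  else dtlnLoop first_num second_num (PySem.List.enumerate first_num)

-- ===== PORT B =====
-- body of B's 'for a, b in zip(reversed(first_num), reversed(second_num))' loop
def cmpStep (c : Int) (p : Int × Int) : Int :=
  if p.1 > p.2 then 1 else if p.1 < p.2 then -1 else c

def determine_the_larger_number_alt (first_num : List Int) (second_num : List Int) : List Int :=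
  if first_num.length ≠ second_num.length then
    (if first_num.length > second_num.length then first_num else second_num)
  else
    let cmp := (first_num.reverse.zip second_num.reverse).foldl cmpStep 0
    if cmp = -1 then second_num else first_num

-- ===== PRECONDITION & SPEC =====
def Spec_determine_the_larger_number (first_num : List Int) (second_num : List Int) (out : List Int) : Prop := out = determine_the_larger_number_alt first_num second_num
instance (first_num : List Int) (second_num : List Int) (out : List Int) : Decidable (Spec_determine_the_larger_number first_num second_num out) := by unfold Spec_determine_the_larger_number; infer_instance

-- ===== CLAIM (what is proved, stated in full; the proofs are below) =====
def Claim_equal_determine_the_larger_number : Prop := ∀ (first_num : List Int) (second_num : List Int), Dom_determine_the_larger_number first_num second_num → Spec_determine_the_larger_number first_num second_num (determine_the_larger_number first_num second_num)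

-- ===== LEMMAS AND PROOFS =====

-- Python's lexicographic '<' on equal-length int lists (proof device linking the two loops)
def listLt : List Int → List Int → Bool
  | [], [] => false
  | [], _ :: _ => true
  | _ :: _, [] => false
  | a :: as_, b :: bs => if a < b then true else if b < a then false else listLt as_ bs

-- A's loop on the enumerated suffix decides listLt on the suffixes
lemma dtlnLoop_eq (f s : List Int) :
    ∀ (fs ss : List Int) (k : Nat), fs = f.drop k → ss = s.drop k →
      fs.length = ss.length →
      dtlnLoop f s (PySem.List.enumerate fs (k : Int)) =
        (if listLt fs ss then s else f) := by
  intro fs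
  induction fs with
  | nil =>
    intro ss k _ _ hlen
    have : ss = [] := List.eq_nil_of_length_eq_zero (by simpa using hlen.symm)
    subst this
    simp [PySem.List.enumerate_nil, dtlnLoop, listLt]
  | cons a fs' ih =>
    intro ss k hf hs hlen
    cases ss with
    | nil => simp at hlen
    | cons b ss' =>
      have hfa : PySem.List.pyGet? f (k : Int) = some a := by
        rw [PySem.List.pyGet?_natCast]
        have h0 : (f.drop k)[0]? = f[k]? := by
          rw [List.getElem?_drop]; simp
        rw [← h0, ← hf]; rfl
      have hsb : PySem.List.pyGet? s (k : Int) = some b := by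
        rw [PySem.List.pyGet?_natCast]
        have h0 : (s.drop k)[0]? = s[k]? := by
          rw [List.getElem?_drop]; simp
        rw [← h0, ← hs]; rfl
      have hdf : fs' = f.drop (k + 1) := by
        have h1 : List.drop 1 (List.drop k f) = List.drop (k + 1) f := List.drop_drop ..
        rw [← h1, ← hf]; rfl
      have hds : ss' = s.drop (k + 1) := by
        have h1 : List.drop 1 (List.drop k s) = List.drop (k + 1) s := List.drop_drop ..
        rw [← h1, ← hs]; rfl
      rw [PySem.List.enumerate_cons]
      simp only [dtlnLoop, hfa, hsb]
      by_cases hab : a = b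
      · subst hab
        have hrec := ih ss' (k + 1) hdf hds (by simpa using hlen)
        push_cast at hrec
        simp [listLt, hrec]
      · rcases lt_or_gt_of_ne hab with h | h
        · simp [hab, not_lt.mpr (le_of_lt h), h, listLt]
        · simp [hab, h, not_lt.mpr (le_of_lt h), listLt]

-- zipping the reversed lists (equal lengths) = reversing the zip
lemma zip_rev (f : List Int) : ∀ (s : List Int), f.length = s.length →
    f.reverse.zip s.reverse = (f.zip s).reverse := by
  induction f with
  | nil => intro s h; simp
  | cons a f' ih =>
    intro s h
    cases s with
    | nil => simp at h
    | cons b s' =>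
      have hlen : f'.length = s'.length := by simpa using h
      have hr : f'.reverse.length = s'.reverse.length := by simpa using hlen
      simp only [List.reverse_cons, List.zip_append hr, ih s' hlen]
      simp [List.zip]

-- the right-to-left fold (written as a foldr) computes -1 exactly on listLt
lemma foldr_cmp (f : List Int) : ∀ (s : List Int), f.length = s.length →
    ((f.zip s).foldr (fun x y => cmpStep y x) 0 = -1 ↔ listLt f s = true) := by
  induction f with
  | nil =>
    intro s h
    have : s = [] := List.eq_nil_of_length_eq_zero (by simpa using h.symm)
    subst this
    simp [listLt]
  | cons a f' ih =>
    intro s h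
    cases s with
    | nil => simp at h
    | cons b s' =>
      have hlen : f'.length = s'.length := by simpa using h
      simp only [List.zip_cons_cons, List.foldr_cons, cmpStep, listLt]
      rcases lt_trichotomy a b with hab | hab | hab
      · simp [hab, not_lt.mpr (le_of_lt hab)]
      · subst hab
        simp only [lt_irrefl, if_false]
        simpa [cmpStep] using ih s' hlen
      · simp [hab, not_lt.mpr (le_of_lt hab)]

-- ===== VERDICT (by name: the statement is the Claim_ definition above) =====
theorem determine_the_larger_number_spec : Claim_equal_determine_the_larger_number := by
  intro f s _
  unfold Spec_determine_the_larger_number determine_the_larger_number determine_the_larger_number_alt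
  rcases lt_trichotomy f.length s.length with h | h | h
  · have hne : f.length ≠ s.length := by omega
    simp [not_lt.mpr (le_of_lt h), h, hne]
  · have hloop := dtlnLoop_eq f s f s 0 rfl rfl h
    simp only [Nat.cast_zero] at hloop
    have hfold : (f.reverse.zip s.reverse).foldl cmpStep 0 =
        (f.zip s).foldr (fun x y => cmpStep y x) 0 := by
      rw [zip_rev f s h, List.foldl_reverse]
    by_cases hlt : listLt f s = true
    · simp [h, hloop, hlt, hfold, (foldr_cmp f s h).mpr hlt]
    · have : (f.zip s).foldr (fun x y => cmpStep y x) 0 ≠ -1 := by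
        intro hc; exact hlt ((foldr_cmp f s h).mp hc)
      simp [h, hloop, hlt, hfold, this]
  · have hne : f.length ≠ s.length := by omega
    simp [h, hne]
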